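-- pv_equiv track=rewrite | github.com/coderwf/pylinq | inter/nodes.py | _group_by_one_index
-- ===== SOURCE A (Python) =====
-- def _group_by_one_index(rows, index):
--     """
--     只按照某一个字段进行聚合
--     :param rows:
--     :param index:
--     :return:
--     """
--     # value - pos map
--     vp_map = {}
--     new_grouped_res = []
--     new_add_index = 0
--     for row_expr_res in rows:
--         value = row_expr_res[index]
--         pos = vp_map.get(value)
--         if pos is None:
--             new_grouped_res.append([row_expr_res])
--             vp_map[value] = new_add_index
--             new_add_index += 1
--         else:
--             add_list = new_grouped_res[pos]
--             add_list.append(row_expr_res)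
--     return new_grouped_res
-- ===== SOURCE B (Python) =====
-- def _group_by_one_index(rows, index):
--     # Staged passes: first collect the distinct key values in first-appearance
--     # order, then build each group by filtering the rows for that key.
--     keys = []
--     for row in rows:
--         if row[index] not in keys:
--             keys.append(row[index])
--     return [[row for row in rows if row[index] == k] for k in keys]
-- ===== Notes on version B (the rewrite author's own statement) =====
-- stated objective: alternative
-- what changed: Replaces A's incremental single pass (value-to-position map plus a growing parallel result list) with two staged passes: first collect the distinct key values in first-appearance order, then build each group by filtering the whole row list for that key; no group state is maintained during traversal.
import Mathlib
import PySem

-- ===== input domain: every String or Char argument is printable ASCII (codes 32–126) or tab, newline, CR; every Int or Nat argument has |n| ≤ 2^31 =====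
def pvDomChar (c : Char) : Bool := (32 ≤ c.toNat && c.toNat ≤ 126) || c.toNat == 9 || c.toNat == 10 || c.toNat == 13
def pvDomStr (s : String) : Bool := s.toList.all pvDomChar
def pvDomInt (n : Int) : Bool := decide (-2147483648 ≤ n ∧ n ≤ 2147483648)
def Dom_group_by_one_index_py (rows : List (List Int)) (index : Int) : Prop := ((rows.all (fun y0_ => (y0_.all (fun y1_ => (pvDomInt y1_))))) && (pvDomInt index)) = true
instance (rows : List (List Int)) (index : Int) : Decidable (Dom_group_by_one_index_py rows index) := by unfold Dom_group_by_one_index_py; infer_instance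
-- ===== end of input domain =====

-- B replaces A's incremental single pass (value-to-position map + growing result list) with
-- two staged passes: collect distinct keys in first-appearance order, then filter rows per key.

-- ===== PORT A =====
def group_by_one_index_py (rows : List (List Int)) (index : Int) : List (List (List Int)) :=
  -- state: (vp_map, new_grouped_res, new_add_index)
  (rows.foldl
    (fun (st : PySem.Dict Int Int × List (List (List Int)) × Int) row =>
      let value := PySem.List.pyGetD row index 0
      match st.1.get? value with
      | none => (st.1.insert value st.2.2, st.2.1 ++ [[row]], st.2.2 + 1)
      | some pos =>
          (st.1, PySem.List.pySetD st.2.1 pos (PySem.List.pyGetD st.2.1 pos [] ++ [row]), st.2.2))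
    (PySem.Dict.empty, [], 0)).2.1

-- ===== PORT B =====
def group_by_one_index_py_alt (rows : List (List Int)) (index : Int) : List (List (List Int)) :=
  -- pass 1: distinct key values in first-appearance order
  let keys := rows.foldl
    (fun (ks : List Int) row =>
      if ks.contains (PySem.List.pyGetD row index 0) then ks
      else ks ++ [PySem.List.pyGetD row index 0]) []
  -- pass 2: one filtering pass over rows per key
  keys.map (fun k => rows.filter (fun row => PySem.List.pyGetD row index 0 == k))

-- ===== PRECONDITION & SPEC =====
-- Pre_ excludes exactly the inputs where Python's row[index] raises IndexError.
def Pre_group_by_one_index_py (rows : List (List Int)) (index : Int) : Prop :=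
  ∀ row ∈ rows, PySem.Raise.InRange row.length index
instance (rows : List (List Int)) (index : Int) : Decidable (Pre_group_by_one_index_py rows index) := by unfold Pre_group_by_one_index_py; infer_instance

def pvWitness_group_by_one_index_py : List (List Int) × Int := ([[1, 2], [1, 3], [2, 4]], 0)

def Spec_group_by_one_index_py (rows : List (List Int)) (index : Int) (out : List (List (List Int))) : Prop := out = group_by_one_index_py_alt rows index
instance (rows : List (List Int)) (index : Int) (out : List (List (List Int))) : Decidable (Spec_group_by_one_index_py rows index out) := by unfold Spec_group_by_one_index_py; infer_instance

-- ===== CLAIM (what is proved, stated in full; the proofs are below) =====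
def Claim_equal_group_by_one_index_py : Prop := ∀ (rows : List (List Int)) (index : Int), Dom_group_by_one_index_py rows index → Pre_group_by_one_index_py rows index → Spec_group_by_one_index_py rows index (group_by_one_index_py rows index)

-- ===== LEMMAS AND PROOFS =====

-- the key of a row, the distinct keys of a prefix, the group of a key
def pvKey (index : Int) (row : List Int) : Int := PySem.List.pyGetD row index 0
def pvKs (index : Int) (p : List (List Int)) : List Int := PySem.Set.ofList (p.map (pvKey index))
def pvGrp (index : Int) (p : List (List Int)) (k : Int) : List (List Int) :=
  p.filter (fun r => pvKey index r == k)
-- A's vp_map as a literal dict: the keys paired with their positions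
def pvPairs : List Int → Int → List (Int × Int)
  | [], _ => []
  | k :: l, n => (k, n) :: pvPairs l (n + 1)

theorem pvPairs_fst (l : List Int) (n : Int) : (pvPairs l n).map Prod.fst = l := by
  induction l generalizing n with
  | nil => rfl
  | cons k l ih => simp [pvPairs, ih]

theorem pvPairs_append (l : List Int) (x : Int) (n : Int) :
    pvPairs (l ++ [x]) n = pvPairs l n ++ [(x, n + l.length)] := by
  induction l generalizing n with
  | nil => simp [pvPairs]
  | cons k l ih => simp [pvPairs, ih]; ring

theorem pvPairs_get? (l : List Int) (n : Int) (v : Int) :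
    (PySem.Dict.mk (pvPairs l n)).get? v =
      if v ∈ l then some (n + (l.idxOf v : Int)) else none := by
  induction l generalizing n with
  | nil => simp [pvPairs, PySem.Dict.get?]
  | cons k l ih =>
    rw [show pvPairs (k :: l) n = (k, n) :: pvPairs l (n + 1) from rfl,
      PySem.Dict.get?_mk_cons, ih]
    by_cases hk : k = v
    · subst hk; simp
    · have hkv : (k == v) = false := by simp [hk]
      simp only [hkv, Bool.false_eq_true, if_false, List.mem_cons, List.idxOf_cons]
      by_cases hv : v ∈ l
      · simp only [hv, or_true, if_true, cond_false]
        congr 1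
        push_cast
        ring
      · simp [hv, Ne.symm hk]

-- replacing one image in a map over a nodup list is List.set at its index
theorem pvMapSet (l : List Int) (hnd : l.Nodup) (x : Int) (hx : x ∈ l)
    (f g : Int → List (List Int)) (r : List Int)
    (hne : ∀ k ∈ l, k ≠ x → g k = f k) (heq : g x = f x ++ [r]) :
    l.map g = (l.map f).set (l.idxOf x) (f x ++ [r]) := by
  have hidx : l.idxOf x < l.length := List.idxOf_lt_length_of_mem hx
  apply List.ext_getElem
  · simp
  · intro i h1 h2
    have hil : i < l.length := by simpa using h1
    simp only [List.getElem_map, List.getElem_set]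
    by_cases hi : l.idxOf x = i
    · rw [if_pos hi]
      have hli : l[i] = x := by subst hi; exact List.getElem_idxOf hidx
      rw [hli, heq]
    · rw [if_neg hi]
      have hne' : l[i]'hil ≠ x := by
        intro hcontra
        have h3 : l[i]'hil = l[l.idxOf x]'hidx := by
          rw [hcontra]; exact (List.getElem_idxOf hidx).symm
        exact hi (((List.Nodup.getElem_inj_iff hnd).mp h3).symm)
      exact hne _ (List.getElem_mem _) hne'

theorem pvGrp_append (index : Int) (p : List (List Int)) (r : List Int) (k : Int) :
    pvGrp index (p ++ [r]) k =
      pvGrp index p k ++ (if pvKey index r == k then [r] else []) := by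
  simp only [pvGrp, List.filter_append]
  cases h : pvKey index r == k <;> simp [h]

-- characterization of A's loop state
theorem pvFoldA (index : Int) (rows : List (List Int)) :
    rows.foldl
      (fun (st : PySem.Dict Int Int × List (List (List Int)) × Int) row =>
        let value := PySem.List.pyGetD row index 0
        match st.1.get? value with
        | none => (st.1.insert value st.2.2, st.2.1 ++ [[row]], st.2.2 + 1)
        | some pos =>
            (st.1, PySem.List.pySetD st.2.1 pos (PySem.List.pyGetD st.2.1 pos [] ++ [row]), st.2.2))
      (PySem.Dict.empty, [], 0)
    = (PySem.Dict.mk (pvPairs (pvKs index rows) 0),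
       (pvKs index rows).map (pvGrp index rows),
       ((pvKs index rows).length : Int)) := by
  induction rows using List.reverseRecOn with
  | nil => rfl
  | append_singleton p r ih =>
    rw [List.foldl_append, ih, List.foldl_cons, List.foldl_nil]
    have hnd : (pvKs index p).Nodup := PySem.Set.nodup_ofList _
    simp only [pvPairs_get?]
    by_cases hmem : PySem.List.pyGetD r index 0 ∈ pvKs index p
    · -- existing key: vp_map yields its position, the row joins that group
      rw [if_pos hmem]
      have hidx : List.idxOf (PySem.List.pyGetD r index 0) (pvKs index p) < (pvKs index p).length :=
        List.idxOf_lt_length_of_mem hmem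
      have hks : pvKs index (p ++ [r]) = pvKs index p := by
        show PySem.Set.ofList ((p ++ [r]).map (pvKey index)) = pvKs index p
        rw [List.map_append, List.map_singleton, PySem.Set.ofList_append_singleton]
        exact PySem.Set.add_of_mem hmem
      refine Prod.ext ?_ (Prod.ext ?_ ?_)
      · show PySem.Dict.mk (pvPairs (pvKs index p) 0)
            = PySem.Dict.mk (pvPairs (pvKs index (p ++ [r])) 0)
        rw [hks]
      · show PySem.List.pySetD ((pvKs index p).map (pvGrp index p))
            (0 + (List.idxOf (PySem.List.pyGetD r index 0) (pvKs index p) : Int))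
            (PySem.List.pyGetD ((pvKs index p).map (pvGrp index p))
              (0 + (List.idxOf (PySem.List.pyGetD r index 0) (pvKs index p) : Int)) [] ++ [r])
            = (pvKs index (p ++ [r])).map (pvGrp index (p ++ [r]))
        rw [zero_add, PySem.List.pySetD_of_nonneg _ _ (Int.natCast_nonneg _),
          PySem.List.pyGetD_natCast, Int.toNat_natCast,
          List.getD_eq_getElem _ _ (by simpa using hidx), List.getElem_map,
          List.getElem_idxOf hidx, hks]
        exact (pvMapSet _ hnd _ hmem (pvGrp index p) (pvGrp index (p ++ [r])) r
          (fun k hk hkne => by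
            have hne : (pvKey index r == k) = false :=
              beq_eq_false_iff_ne.mpr fun h => hkne (h.symm)
            simp [pvGrp_append, hne])
          (by simp [pvGrp_append, pvKey])).symm
      · show ((pvKs index p).length : Int) = ((pvKs index (p ++ [r])).length : Int)
        rw [hks]
    · -- new key: a fresh group is appended at the end
      rw [if_neg hmem]
      have hmem2 := hmem
      simp only [pvKs, PySem.Set.mem_ofList, List.mem_map, not_exists, not_and] at hmem2
      have hks : pvKs index (p ++ [r]) = pvKs index p ++ [pvKey index r] := by
        show PySem.Set.ofList ((p ++ [r]).map (pvKey index)) = _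
        rw [List.map_append, List.map_singleton, PySem.Set.ofList_append_singleton]
        exact PySem.Set.add_of_not_mem hmem
      have hgrpnil : pvGrp index p (pvKey index r) = [] := by
        simp only [pvGrp, List.filter_eq_nil_iff]
        intro a ha h
        exact hmem2 a ha (by simpa using h)
      have hkeysmk : (PySem.Dict.mk (pvPairs (pvKs index p) 0)).keys = pvKs index p :=
        pvPairs_fst _ _
      refine Prod.ext ?_ (Prod.ext ?_ ?_)
      · show (PySem.Dict.mk (pvPairs (pvKs index p) 0)).insert (PySem.List.pyGetD r index 0)
            ((pvKs index p).length : Int)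
            = PySem.Dict.mk (pvPairs (pvKs index (p ++ [r])) 0)
        apply PySem.Dict.ext
        have hnc : (PySem.Dict.mk (pvPairs (pvKs index p) 0)).contains
            (PySem.List.pyGetD r index 0) = false := by
          rw [Bool.eq_false_iff]
          intro hc
          exact hmem (by rw [← hkeysmk]
                         exact (PySem.Dict.contains_iff_mem_keys _ _).mp hc)
        rw [PySem.Dict.items_insert_of_not_contains _ _ hnc, hks, pvPairs_append]
        simp [pvKey]
      · show ((pvKs index p).map (pvGrp index p)) ++ [[r]]
            = (pvKs index (p ++ [r])).map (pvGrp index (p ++ [r]))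
        rw [hks, List.map_append]
        congr 1
        · refine (List.map_congr_left fun k hk => ?_).symm
          have hne : (pvKey index r == k) = false :=
            beq_eq_false_iff_ne.mpr fun h => hmem (by
              rw [show PySem.List.pyGetD r index 0 = pvKey index r from rfl, h]; exact hk)
          simp [pvGrp_append, hne]
        · simp [pvGrp_append, hgrpnil]
      · show ((pvKs index p).length : Int) + 1 = ((pvKs index (p ++ [r])).length : Int)
        rw [hks]
        simp

-- B's first pass builds exactly the distinct keys (PySem.Set.ofList of the mapped keys)
theorem pvKeysB (index : Int) (rows : List (List Int)) :
    rows.foldl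
      (fun (ks : List Int) row =>
        if ks.contains (PySem.List.pyGetD row index 0) then ks
        else ks ++ [PySem.List.pyGetD row index 0]) []
    = pvKs index rows := by
  rw [pvKs, PySem.Set.ofList_eq_foldl, List.foldl_map]
  rfl

theorem pvAltEq (index : Int) (rows : List (List Int)) :
    group_by_one_index_py_alt rows index = (pvKs index rows).map (pvGrp index rows) := by
  unfold group_by_one_index_py_alt
  rw [pvKeysB]
  rfl

-- ===== VERDICT (by name: the statement is the Claim_ definition above) =====
theorem group_by_one_index_py_spec : Claim_equal_group_by_one_index_py := by
  intro rows index _ _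
  unfold Spec_group_by_one_index_py group_by_one_index_py
  rw [pvFoldA, pvAltEq]
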